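-- pv_equiv track=rewrite | github.com/captain-noob/vulnscanner | lib/module/variables.py | removeunwanted
-- ===== SOURCE A (Python) =====
-- def removeunwanted(data):
--     balcklist =[
--     '.',"'",'"','{',"}",',','+','-','>','<',';','(',')','!',
--     ]
--     for elem in balcklist:
--         if elem =='"' or elem == "'":
--             if ('['  in data) and (']'  in data):
--                 continue
--         if elem  in data :
--             return(data)
-- ===== SOURCE B (Python) =====
-- def removeunwanted(data):
--     bad = {'.', '{', '}', ',', '+', '-', '>', '<', ';', '(', ')', '!'}
--     if not ('[' in data and ']' in data):
--         bad |= {'"', "'"}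
--     for ch in data:
--         if ch in bad:
--             return data
-- ===== Notes on version B (the rewrite author's own statement) =====
-- stated objective: idiomatic
-- what changed: B builds the active blacklist as a character set once (adding the quotes only when data lacks a [...] pair) and makes a single pass over data, instead of A's loop over the blacklist with one substring scan of data per element.
import Mathlib
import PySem

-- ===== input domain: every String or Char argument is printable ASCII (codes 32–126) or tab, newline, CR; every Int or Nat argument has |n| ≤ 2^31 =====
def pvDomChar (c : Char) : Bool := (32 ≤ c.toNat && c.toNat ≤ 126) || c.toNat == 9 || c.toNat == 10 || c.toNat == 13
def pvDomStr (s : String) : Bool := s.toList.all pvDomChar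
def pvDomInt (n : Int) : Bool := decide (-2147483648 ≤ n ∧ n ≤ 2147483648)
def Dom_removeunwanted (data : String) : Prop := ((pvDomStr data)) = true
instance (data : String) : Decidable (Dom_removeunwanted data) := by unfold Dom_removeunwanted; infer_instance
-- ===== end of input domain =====

-- B replaces A's loop over the blacklist (one substring scan of data per element) by one
-- precomputed character set and a single pass over data (objective: idiomatic).

-- ===== PORT A =====
-- the 'for elem in balcklist' loop: continue past the quotes when data has both brackets
def removeunwantedGo (data : String) : List String → Option String
  | [] => none
  | elem :: rest =>
    if (elem == "\"" || elem == "'") &&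
        (PySem.Str.isIn "[" data && PySem.Str.isIn "]" data) then
      removeunwantedGo data rest
    else if PySem.Str.isIn elem data then some data
    else removeunwantedGo data rest

def removeunwanted (data : String) : Option String :=
  let balcklist : List String :=
    [".", "'", "\"", "{", "}", ",", "+", "-", ">", "<", ";", "(", ")", "!"]
  removeunwantedGo data balcklist

-- ===== PORT B =====
-- single pass over data's characters, first hit returns data
def removeunwantedAltGo (data : String) (bad : PySem.Set Char) : List Char → Option String
  | [] => none
  | c :: cs => if PySem.Set.contains bad c then some data else removeunwantedAltGo data bad cs

def removeunwanted_alt (data : String) : Option String :=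
  let bad0 : PySem.Set Char :=
    PySem.Set.ofList ['.', '{', '}', ',', '+', '-', '>', '<', ';', '(', ')', '!']
  let bad : PySem.Set Char :=
    if !(PySem.Str.isIn "[" data && PySem.Str.isIn "]" data) then
      PySem.Set.add (PySem.Set.add bad0 '"') '\''
    else bad0
  removeunwantedAltGo data bad data.toList

-- ===== PRECONDITION & SPEC =====
def Spec_removeunwanted (data : String) (out : Option String) : Prop := out = removeunwanted_alt data
instance (data : String) (out : Option String) : Decidable (Spec_removeunwanted data out) := by unfold Spec_removeunwanted; infer_instance

-- ===== CLAIM (what is proved, stated in full; the proofs are below) =====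
def Claim_equal_removeunwanted : Prop := ∀ (data : String), Dom_removeunwanted data → Spec_removeunwanted data (removeunwanted data)

-- ===== LEMMAS AND PROOFS =====

-- B's scan returns `some data` exactly when some scanned character is in the set
theorem altGo_eq (data : String) (bad : PySem.Set Char) (cs : List Char) :
    removeunwantedAltGo data bad cs
      = (if cs.any (fun c => PySem.Set.contains bad c) then some data else none) := by
  induction cs with
  | nil => rfl
  | cons c cs ih =>
    rw [removeunwantedAltGo, ih, List.any_cons]
    cases h : PySem.Set.contains bad c <;> simp

-- A's loop returns `some data` exactly when some non-skipped blacklist element occurs in data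
theorem go_eq (data : String) (l : List String) :
    removeunwantedGo data l
      = (if l.any (fun e =>
            !((e == "\"" || e == "'") && (PySem.Str.isIn "[" data && PySem.Str.isIn "]" data))
              && PySem.Str.isIn e data) then some data else none) := by
  induction l with
  | nil => rfl
  | cons e rest ih =>
    rw [removeunwantedGo, ih, List.any_cons]
    cases hq : ((e == "\"" || e == "'") && (PySem.Str.isIn "[" data && PySem.Str.isIn "]" data)) <;>
      cases hi : PySem.Str.isIn e data <;> simp

-- single-character Python substring test = character membership
theorem isIn_single (c : Char) (s sub : String) (h : sub.toList = [c]) :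
    PySem.Str.isIn sub s = s.toList.any (· == c) := by
  rw [Bool.eq_iff_iff, PySem.Str.isIn_iff_infix, h, List.singleton_infix_iff]
  simp [List.any_eq_true]

theorem removeunwanted_spec : Claim_equal_removeunwanted := by
  intro data _
  unfold Spec_removeunwanted removeunwanted removeunwanted_alt
  rw [go_eq, altGo_eq]
  cases hbr : (PySem.Str.isIn "[" data && PySem.Str.isIn "]" data) with
  | false =>
    simp only [Bool.not_false, if_true]
    refine if_congr ?_ rfl rfl
    simp only [List.any_cons, List.any_nil,
        Bool.and_false, Bool.not_false, Bool.true_and, Bool.or_false]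
    rw [isIn_single '.' data "." (by decide), isIn_single '\'' data "'" (by decide),
        isIn_single '"' data "\"" (by decide), isIn_single '{' data "{" (by decide),
        isIn_single '}' data "}" (by decide), isIn_single ',' data "," (by decide),
        isIn_single '+' data "+" (by decide), isIn_single '-' data "-" (by decide),
        isIn_single '>' data ">" (by decide), isIn_single '<' data "<" (by decide),
        isIn_single ';' data ";" (by decide), isIn_single '(' data "(" (by decide),
        isIn_single ')' data ")" (by decide), isIn_single '!' data "!" (by decide)]
    have hset : PySem.Set.add (PySem.Set.add
        (PySem.Set.ofList ['.', '{', '}', ',', '+', '-', '>', '<', ';', '(', ')', '!']) '"') '\''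
        = ['.', '{', '}', ',', '+', '-', '>', '<', ';', '(', ')', '!', '"', '\''] := by decide
    simp only [hset, List.any_eq_true, PySem.Set.contains_eq_listContains,
      List.contains_eq_mem, List.mem_cons, List.not_mem_nil, or_false, decide_eq_true_eq,
      Bool.or_eq_true, beq_iff_eq, exists_eq_right]
    constructor
    · intro h
      rcases h with h|h|h|h|h|h|h|h|h|h|h|h|h|h <;> exact ⟨_, h, by decide⟩
    · rintro ⟨x, hx, hc⟩
      rcases hc with rfl|rfl|rfl|rfl|rfl|rfl|rfl|rfl|rfl|rfl|rfl|rfl|rfl|rfl <;> simp [hx]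
  | true =>
    simp only [Bool.not_true]
    refine if_congr ?_ rfl rfl
    simp only [List.any_cons, List.any_nil, Bool.and_true, Bool.or_false]
    rw [isIn_single '.' data "." (by decide), isIn_single '\'' data "'" (by decide),
        isIn_single '"' data "\"" (by decide), isIn_single '{' data "{" (by decide),
        isIn_single '}' data "}" (by decide), isIn_single ',' data "," (by decide),
        isIn_single '+' data "+" (by decide), isIn_single '-' data "-" (by decide),
        isIn_single '>' data ">" (by decide), isIn_single '<' data "<" (by decide),
        isIn_single ';' data ";" (by decide), isIn_single '(' data "(" (by decide),
        isIn_single ')' data ")" (by decide), isIn_single '!' data "!" (by decide)]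
    have hset : PySem.Set.ofList ['.', '{', '}', ',', '+', '-', '>', '<', ';', '(', ')', '!']
        = ['.', '{', '}', ',', '+', '-', '>', '<', ';', '(', ')', '!'] := by decide
    simp [hset, List.any_eq_true, beq_iff_eq]
    constructor
    · intro h
      rcases h with h|h|h|h|h|h|h|h|h|h|h|h <;> exact ⟨_, h, by decide⟩
    · rintro ⟨x, hx, hc⟩
      rcases hc with rfl|rfl|rfl|rfl|rfl|rfl|rfl|rfl|rfl|rfl|rfl|rfl <;> simp [hx]
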